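-- pv_equiv track=rewrite | github.com/tarekfb/emi-processing | emi.py | find_next_occurrence
-- ===== SOURCE A (Python) =====
-- def find_next_occurrence(lines, start_string, target_string):
--     found_start = False
--     for line in lines:
--         if not found_start and start_string in line:
--             found_start = True
--         elif found_start:
--             if target_string in line:
--                 return line
--     return None
-- ===== SOURCE B (Python) =====
-- def find_next_occurrence(lines, start_string, target_string):
--     starts = [i for i, line in enumerate(lines) if start_string in line]
--     if not starts:
--         return None
--     first = starts[0]
--     after = [line for i, line in enumerate(lines) if first < i and target_string in line]
--     return after[0] if after else None
-- ===== Notes on version B (the rewrite author's own statement) =====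
-- stated objective: alternative
-- what changed: Replaced A's stateful flag-driven scan by a declarative formulation: two enumerate-comprehensions collect all start indices and all target lines, and the result is the first target line whose index exceeds the first start index - index arithmetic instead of loop state.
import Mathlib
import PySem

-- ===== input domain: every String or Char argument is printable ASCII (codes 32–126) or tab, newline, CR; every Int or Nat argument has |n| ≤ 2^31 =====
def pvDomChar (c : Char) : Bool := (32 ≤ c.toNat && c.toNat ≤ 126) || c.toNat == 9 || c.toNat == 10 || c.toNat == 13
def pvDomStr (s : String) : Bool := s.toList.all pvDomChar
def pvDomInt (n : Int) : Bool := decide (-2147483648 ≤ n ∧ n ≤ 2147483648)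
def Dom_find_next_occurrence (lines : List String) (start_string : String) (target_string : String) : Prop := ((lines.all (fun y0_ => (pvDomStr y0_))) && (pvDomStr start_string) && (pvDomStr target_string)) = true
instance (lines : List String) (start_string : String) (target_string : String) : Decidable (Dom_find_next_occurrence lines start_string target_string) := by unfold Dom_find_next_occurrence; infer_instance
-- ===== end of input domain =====

-- B replaces A's flag-driven scan by a declarative formulation: comprehensions over
-- enumerate(lines) collect start indices and target lines, combined by index comparison.

-- ===== PORT A =====
-- the for-loop of A with its `found_start` flag as explicit state
def fnoLoopA (start_string target_string : String) : List String → Bool → Option String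
  | [], _ => none
  | line :: rest, found_start =>
    if !found_start && PySem.Str.isIn start_string line then
      fnoLoopA start_string target_string rest true
    else if found_start then
      if PySem.Str.isIn target_string line then some line
      else fnoLoopA start_string target_string rest found_start
    else fnoLoopA start_string target_string rest found_start

def find_next_occurrence (lines : List String) (start_string : String) (target_string : String) : Option String :=
  fnoLoopA start_string target_string lines false

-- ===== PORT B =====
-- starts = [i for i, line in enumerate(lines) if start_string in line]; if empty → None;
-- after  = [line for i, line in enumerate(lines) if first < i and target_string in line]
def find_next_occurrence_alt (lines : List String) (start_string : String) (target_string : String) : Option String :=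
  let starts := ((PySem.List.enumerate lines).filter (fun p => PySem.Str.isIn start_string p.2)).map Prod.fst
  match starts with
  | [] => none
  | first :: _ =>
    let after := ((PySem.List.enumerate lines).filter (fun p => decide (first < p.1) && PySem.Str.isIn target_string p.2)).map Prod.snd
    match after with
    | [] => none
    | l :: _ => some l

-- ===== PRECONDITION & SPEC =====
def Spec_find_next_occurrence (lines : List String) (start_string : String) (target_string : String) (out : Option String) : Prop := out = find_next_occurrence_alt lines start_string target_string
instance (lines : List String) (start_string : String) (target_string : String) (out : Option String) : Decidable (Spec_find_next_occurrence lines start_string target_string out) := by unfold Spec_find_next_occurrence; infer_instance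

-- ===== CLAIM =====
def Claim_equal_find_next_occurrence : Prop := ∀ (lines : List String) (start_string : String) (target_string : String), Dom_find_next_occurrence lines start_string target_string → Spec_find_next_occurrence lines start_string target_string (find_next_occurrence lines start_string target_string)

-- ===== LEMMAS AND PROOFS =====

-- every index in enumerate ls s exceeds t when t < s, so that conjunct of the filter is vacuous
theorem fno_filter_true (ts : String) (ls : List String) (s t : Int) (h : t < s) :
    (PySem.List.enumerate ls s).filter (fun p => decide (t < p.1) && PySem.Str.isIn ts p.2)
      = (PySem.List.enumerate ls s).filter (fun p => PySem.Str.isIn ts p.2) := by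
  apply List.filter_congr
  intro p hp
  rcases (PySem.List.mem_enumerate_iff ls s p).1 hp with ⟨k, hk, rfl⟩
  have : t < s + (k : Int) := by omega
  simp [this]

-- A's loop with the flag set returns the first line containing the target
def fnoFirstTarget (ts : String) : List String → Option String
  | [] => none
  | l :: rest => if PySem.Str.isIn ts l then some l else fnoFirstTarget ts rest

theorem fnoLoopA_true (ss ts : String) (ls : List String) :
    fnoLoopA ss ts ls true = fnoFirstTarget ts ls := by
  induction ls with
  | nil => rfl
  | cons l rest ih => simp [fnoLoopA, fnoFirstTarget, ih]

theorem fno_search_eq (ts : String) (ls : List String) (s : Int) :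
    (match ((PySem.List.enumerate ls s).filter (fun p => PySem.Str.isIn ts p.2)).map Prod.snd with
     | [] => (none : Option String)
     | l :: _ => some l) = fnoFirstTarget ts ls := by
  induction ls generalizing s with
  | nil => rfl
  | cons l rest ih =>
    by_cases h : PySem.Chars.isIn ts.toList l.toList = true
    · simp only [PySem.List.enumerate_cons, List.filter_cons]
      simp [h, fnoFirstTarget, PySem.Str.isIn]
    · simp only [PySem.List.enumerate_cons, List.filter_cons]
      simp only [h, if_neg, Bool.false_eq_true, not_false_eq_true,
        fnoFirstTarget, PySem.Str.isIn]
      exact ih (s+1)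

-- main invariant: A's flag-false loop equals B's expression over enumerate with any offset
theorem fno_main (ss ts : String) (ls : List String) (s : Int) :
    fnoLoopA ss ts ls false =
      (match ((PySem.List.enumerate ls s).filter (fun p => PySem.Str.isIn ss p.2)).map Prod.fst with
       | [] => none
       | first :: _ =>
         match ((PySem.List.enumerate ls s).filter (fun p => decide (first < p.1) && PySem.Str.isIn ts p.2)).map Prod.snd with
         | [] => none
         | l :: _ => some l) := by
  induction ls generalizing s with
  | nil => rfl
  | cons l rest ih =>
    by_cases h : PySem.Str.isIn ss l = true
    · -- A sets the flag here; B's first = s, and the after-filter drops this line (¬ s < s)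
      have h' : PySem.Chars.isIn ss.toList l.toList = true := by
        simpa [PySem.Str.isIn] using h
      have hA : fnoLoopA ss ts (l :: rest) false = fnoLoopA ss ts rest true := by
        simp [fnoLoopA, h']
      rw [hA, fnoLoopA_true]
      simp only [PySem.List.enumerate_cons, List.filter_cons]
      simp only [h, if_pos, List.map_cons]
      have hss : (decide ((s : Int) < (s, l).1) && PySem.Str.isIn ts (s, l).2) = false := by simp
      simp only [hss, if_neg, Bool.false_eq_true, not_false_eq_true]
      rw [fno_filter_true ts rest (s+1) s (by omega), fno_search_eq]
    · -- A keeps the flag unset; B drops this line from both filters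
      have h' : PySem.Chars.isIn ss.toList l.toList = false := by
        simpa [PySem.Str.isIn] using h
      have hA : fnoLoopA ss ts (l :: rest) false = fnoLoopA ss ts rest false := by
        simp [fnoLoopA, h']
      rw [hA, ih (s+1)]
      simp only [PySem.List.enumerate_cons, List.filter_cons]
      have hss : PySem.Str.isIn ss (s, l).2 = false := by simpa using h
      simp only [hss, Bool.false_eq_true, not_false_eq_true, if_neg]
      cases hst : ((PySem.List.enumerate rest (s+1)).filter (fun p => PySem.Str.isIn ss p.2)).map Prod.fst with
      | nil => simp [hst]
      | cons first tl =>
        have hmem : ∃ p ∈ (PySem.List.enumerate rest (s+1)).filter (fun p => PySem.Str.isIn ss p.2), p.1 = first := by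
          cases hq : (PySem.List.enumerate rest (s+1)).filter (fun p => PySem.Str.isIn ss p.2) with
          | nil => rw [hq] at hst; simp at hst
          | cons q ql =>
            refine ⟨q, by simp [hq], ?_⟩
            rw [hq] at hst; simp at hst; exact hst.1
        rcases hmem with ⟨p, hp, hp1⟩
        have hp' := List.mem_of_mem_filter hp
        rcases (PySem.List.mem_enumerate_iff rest (s+1) p).1 hp' with ⟨k, hk, hpe⟩
        have hfirst : (s : Int) + 1 ≤ first := by
          rw [← hp1, hpe]; simp
        have hdrop : (decide (first < (s, l).1) && PySem.Str.isIn ts (s, l).2) = false := by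
          have : ¬ (first < s) := by omega
          simp [this]
        simp only [hst, hdrop, Bool.false_eq_true, not_false_eq_true, if_neg]

-- ===== VERDICT =====
theorem find_next_occurrence_spec : Claim_equal_find_next_occurrence := by
  intro lines ss ts _
  unfold Spec_find_next_occurrence find_next_occurrence find_next_occurrence_alt
  exact fno_main ss ts lines 0
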